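-- pv_equiv track=rewrite | github.com/Offhornet28/Duncan-College-Projects | CSC380/gw_analysis_project/backend/src/graph_creator.py | is_decreasing
-- ===== SOURCE A (Python) =====
-- def is_decreasing(altitudes):
--     # Check if there's a decreasing trend for at least 5 consecutive points
--     decreasing_count = 0
--     for i in range(1, len(altitudes)):
--         if altitudes[i] < altitudes[i - 1]:
--             decreasing_count += 1
--             if decreasing_count >= 5:
--                 return True
--         else:
--             decreasing_count = 0  # Reset count if not decreasing
--     return False
-- ===== SOURCE B (Python) =====
-- def dec_prefix(m, s):
--     # True iff the first m adjacent comparisons of s are all strict decreases.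
--     if m == 0:
--         return True
--     if len(s) < 2:
--         return False
--     return s[1] < s[0] and dec_prefix(m - 1, s[1:])
--
-- def is_decreasing(altitudes):
--     # Existential window search: True iff some window of 6 consecutive points
--     # is strictly decreasing (5 strict decreases in a row).
--     windows = [altitudes[i:i + 6] for i in range(len(altitudes))]
--     return any(dec_prefix(5, w) for w in windows)
-- ===== Notes on version B (the rewrite author's own statement) =====
-- stated objective: alternative
-- what changed: A tracks a run counter over adjacent pairs with early return at 5; B performs an existential window search with no counter: it enumerates all suffixes and asks whether any suffix begins with 5 strict decreases (a strictly decreasing window of 6 points).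
import Mathlib
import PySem

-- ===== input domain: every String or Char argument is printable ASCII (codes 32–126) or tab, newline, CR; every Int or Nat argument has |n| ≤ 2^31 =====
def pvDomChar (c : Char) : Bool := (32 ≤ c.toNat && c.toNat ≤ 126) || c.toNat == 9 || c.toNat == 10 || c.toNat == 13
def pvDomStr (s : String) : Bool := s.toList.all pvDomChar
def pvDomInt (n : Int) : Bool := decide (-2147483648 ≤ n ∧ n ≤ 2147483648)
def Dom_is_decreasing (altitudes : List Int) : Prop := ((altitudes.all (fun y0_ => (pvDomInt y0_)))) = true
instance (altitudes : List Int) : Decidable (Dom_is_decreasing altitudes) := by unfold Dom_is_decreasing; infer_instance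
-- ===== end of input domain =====

-- B replaces A's run-counter loop by an existential window search over all suffixes (alternative decomposition, same cost).

-- ===== PORT A =====
-- A's loop walks adjacent pairs keeping a reset counter, returning True the moment it hits 5.
def isDecLoopA (prev : Int) (count : Int) : List Int → Bool
  | [] => false
  | x :: rest =>
    if x < prev then
      if count + 1 ≥ 5 then true else isDecLoopA x (count + 1) rest
    else isDecLoopA x 0 rest

def is_decreasing (altitudes : List Int) : Bool :=
  match altitudes with
  | [] => false
  | a :: rest => isDecLoopA a 0 rest

-- ===== PORT B =====
-- dec_prefix(m, s): the first m adjacent comparisons of s are all strict decreases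
def decPrefix (m : Int) (s : List Int) : Bool :=
  if m = 0 then true
  else
    match s with
    | x :: y :: rest => decide (y < x) && decPrefix (m - 1) (y :: rest)
    | _ => false
termination_by s.length

-- the list [altitudes[i:i+6] for i in range(len(altitudes))]
def windowsB : List Int → List (List Int)
  | [] => []
  | x :: xs => (x :: xs).take 6 :: windowsB xs

def is_decreasing_alt (altitudes : List Int) : Bool :=
  (windowsB altitudes).any (fun s => decPrefix 5 s)

-- ===== PRECONDITION & SPEC =====
def Spec_is_decreasing (altitudes : List Int) (out : Bool) : Prop := out = is_decreasing_alt altitudes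
instance (altitudes : List Int) (out : Bool) : Decidable (Spec_is_decreasing altitudes out) := by unfold Spec_is_decreasing; infer_instance

-- ===== CLAIM (what is proved, stated in full; the proofs are below) =====
def Claim_equal_is_decreasing : Prop := ∀ (altitudes : List Int), Dom_is_decreasing altitudes → Spec_is_decreasing altitudes (is_decreasing altitudes)

-- ===== LEMMAS AND PROOFS =====

-- proof-only helper: the full suffixes of a list
def suffixesB : List Int → List (List Int)
  | [] => []
  | x :: xs => (x :: xs) :: suffixesB xs

-- decPrefix m only looks at the first m+1 elements
theorem decPrefix_take (s : List Int) : ∀ (m : Int) (n : Nat), 0 ≤ m → m + 1 ≤ (n : Int) →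
    decPrefix m (s.take n) = decPrefix m s := by
  induction s with
  | nil => intro m n _ _; simp
  | cons x xs ih =>
      intro m n hm hn
      by_cases hm0 : m = 0
      · subst hm0
        rw [decPrefix.eq_def, decPrefix.eq_def]; simp
      · have hn2 : 2 ≤ n := by omega
        obtain ⟨n', rfl⟩ : ∃ n', n = n' + 1 := ⟨n - 1, by omega⟩
        rw [List.take_succ_cons]
        cases xs with
        | nil =>
            have hn1 : 1 ≤ n' := by push_cast at hn ⊢; omega
            obtain ⟨n'', rfl⟩ : ∃ n'', n' = n'' + 1 := ⟨n' - 1, by omega⟩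
            simp
        | cons y rest =>
            obtain ⟨n'', rfl⟩ : ∃ n'', n' = n'' + 1 := ⟨n' - 1, by omega⟩
            rw [List.take_succ_cons]
            rw [decPrefix.eq_def, if_neg hm0]
            rw [decPrefix.eq_def, if_neg hm0]
            simp only []
            congr 1
            rw [show y :: rest.take n'' = (y :: rest).take (n'' + 1) from (List.take_succ_cons).symm]
            exact ih (m - 1) (n'' + 1) (by omega) (by push_cast at hn ⊢; omega)

-- the window search equals the suffix search: each window is the 6-element prefix of a suffix
theorem anyWindows_eq_anySuffixes (l : List Int) :
    (windowsB l).any (fun s => decPrefix 5 s) = (suffixesB l).any (fun s => decPrefix 5 s) := by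
  induction l with
  | nil => rfl
  | cons x xs ih =>
      rw [windowsB, suffixesB, List.any_cons, List.any_cons, ih,
        decPrefix_take (x :: xs) 5 6 (by norm_num) (by norm_num)]

-- decPrefix is antitone in m: a longer decreasing prefix contains a shorter one
theorem decPrefix_mono (s : List Int) : ∀ (m k : Int), 0 ≤ m → m ≤ k →
    decPrefix k s = true → decPrefix m s = true := by
  induction s with
  | nil =>
      intro m k hm hmk h
      by_cases hk : k = 0
      · subst hk; rw [show m = (0:Int) by omega]; exact h
      · rw [decPrefix.eq_def, if_neg hk] at h; exact absurd h (by simp)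
  | cons x xs ih =>
      intro m k hm hmk h
      by_cases hm0 : m = 0
      · rw [decPrefix.eq_def, if_pos hm0]
      · have hk0 : ¬ k = 0 := by omega
        rw [decPrefix.eq_def, if_neg hk0] at h
        rw [decPrefix.eq_def, if_neg hm0]
        cases xs with
        | nil => exact absurd h (by simp)
        | cons y rest =>
            simp only [Bool.and_eq_true] at h ⊢
            exact ⟨h.1, ih (m - 1) (k - 1) (by omega) (by omega) h.2⟩

-- main invariant: A's counter loop from (prev, c) equals B's window search
theorem loopA_eq_window (rest : List Int) : ∀ (prev c : Int), 0 ≤ c → c ≤ 4 →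
    isDecLoopA prev c rest =
      (decPrefix (5 - c) (prev :: rest) || (suffixesB rest).any (fun s => decPrefix 5 s)) := by
  induction rest with
  | nil =>
      intro prev c _ hc
      have h5 : ¬ (5 - c = 0) := by omega
      simp [isDecLoopA, suffixesB, decPrefix, h5]
  | cons x rs ih =>
      intro prev c hc0 hc4
      have h5 : ¬ (5 - c = 0) := by omega
      rw [isDecLoopA]
      by_cases hx : x < prev
      · rw [if_pos hx]
        by_cases hge : c + 1 ≥ 5
        · rw [if_pos hge]
          have hc : c = 4 := by omega
          subst hc
          have : decPrefix (5 - 4) (prev :: x :: rs) = true := by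
            rw [decPrefix.eq_def, if_neg (by norm_num)]
            have h0 : decPrefix 0 (x :: rs) = true := by
              rw [decPrefix.eq_def]; simp
            simp [hx, h0]
          rw [this]; simp
        · rw [if_neg hge]
          rw [ih x (c + 1) (by omega) (by omega)]
          have hstep : decPrefix (5 - c) (prev :: x :: rs)
              = decPrefix (5 - (c + 1)) (x :: rs) := by
            rw [decPrefix.eq_def, if_neg h5]
            have harith : (5:Int) - c - 1 = 5 - (c + 1) := by ring
            simp only [hx, decide_true, Bool.true_and, harith]
          rw [suffixesB, List.any_cons, hstep]
          by_cases hw : decPrefix 5 (x :: rs) = true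
          · have habs : decPrefix (5 - (c + 1)) (x :: rs) = true :=
              decPrefix_mono _ _ 5 (by omega) (by omega) hw
            simp [hw, habs]
          · simp only [Bool.not_eq_true] at hw
            simp [hw]
      · rw [if_neg hx]
        rw [ih x 0 le_rfl (by norm_num)]
        have hfalse : decPrefix (5 - c) (prev :: x :: rs) = false := by
          rw [decPrefix.eq_def, if_neg h5]
          simp [hx]
        rw [hfalse, suffixesB, List.any_cons]
        simp

-- ===== VERDICT (by name: the statement is the Claim_ definition above) =====
theorem is_decreasing_spec : Claim_equal_is_decreasing := by
  intro altitudes _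
  unfold Spec_is_decreasing
  cases altitudes with
  | nil => simp [is_decreasing, is_decreasing_alt, windowsB]
  | cons a rest =>
      show isDecLoopA a 0 rest = _
      rw [loopA_eq_window rest a 0 le_rfl (by norm_num)]
      unfold is_decreasing_alt
      rw [anyWindows_eq_anySuffixes, suffixesB, List.any_cons]
      norm_num
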